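-- pv_equiv track=rewrite | github.com/anshpak/comp-practice | .ipynb_checkpoints/BPSW-checkpoint.py | is_power_of_number
-- ===== SOURCE A (Python) =====
-- from math import sqrt
--
-- def is_power_of_number(n):
--     root = int(sqrt(n))
--     for i in range(2, root + 1):
--         temp = n
--         count = 0
--         while temp % i == 0:
--             temp //= i
--             count += 1
--         if count > 1:
--             return True
--     return False
-- ===== SOURCE B (Python) =====
-- def is_power_of_number(n):
--     i = 2
--     while i * i <= n:
--         if n % (i * i) == 0:
--             return True
--         i += 1
--     return False
-- ===== Notes on version B (the rewrite author's own statement) =====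
-- stated objective: simpler
-- what changed: B drops the float sqrt bound and the inner multiplicity-counting while loop: a single while loop runs i as long as i*i <= n and tests n % (i*i) == 0 directly, since a multiplicity count > 1 is exactly divisibility by i*i.
-- crash fix: On negative n, A raises ValueError (math domain error from sqrt) while B returns False. — e.g. on is_power_of_number(-4): A raises ValueError, B returns false
import Mathlib
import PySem

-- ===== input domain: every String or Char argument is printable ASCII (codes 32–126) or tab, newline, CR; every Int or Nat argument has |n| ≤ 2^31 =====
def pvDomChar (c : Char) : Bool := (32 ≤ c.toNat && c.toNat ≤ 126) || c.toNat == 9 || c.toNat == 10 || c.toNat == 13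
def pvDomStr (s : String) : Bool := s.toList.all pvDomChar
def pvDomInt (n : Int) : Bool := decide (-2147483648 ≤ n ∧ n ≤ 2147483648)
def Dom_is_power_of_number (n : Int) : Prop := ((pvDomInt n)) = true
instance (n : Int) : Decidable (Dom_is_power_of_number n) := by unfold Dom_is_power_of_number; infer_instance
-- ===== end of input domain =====

-- B replaces A's float-sqrt bound and inner multiplicity-counting while loop by one while loop
-- testing n % (i*i) == 0 while i*i <= n (objective: simpler; equivalence proved on 0 ≤ n).

-- ===== PORT A =====
-- inner 'while temp % i == 0: temp //= i; count += 1' (fuel is only a totality guard: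
-- on every admitted input reaching the loop, temp = n ≥ 4 and i ≥ 2, so it terminates well within n.natAbs+1 steps)
def pvCountLoop (i : Int) : Int → Int → Nat → Int
  | _, count, 0 => count
  | temp, count, fuel+1 =>
      if PySem.Int.mod temp i == 0 then
        pvCountLoop i (PySem.Int.floordiv temp i) (count + 1) fuel
      else count

-- 'for i in range(2, root+1): … if count > 1: return True' / 'return False'
def pvLoopA (n : Int) : List Int → Bool
  | [] => false
  | i :: rest =>
      let count := pvCountLoop i n 0 (n.natAbs + 1)
      if count > 1 then true else pvLoopA n rest

-- root = int(sqrt(n)): for 0 ≤ n ≤ 2^31 (the stated domain) double sqrt is correctly rounded,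
-- so int(math.sqrt(n)) is exactly the integer square root Int.sqrt n; Python raises on n < 0 (excluded by Pre_).
def is_power_of_number (n : Int) : Bool :=
  pvLoopA n (PySem.List.pyRange 2 (Int.sqrt n + 1) 1)

-- ===== PORT B =====
-- 'i = 2; while i*i <= n: if n % (i*i) == 0: return True; i += 1; return False'
-- (fuel is only a totality guard: i starts at 2 and the loop stops once i*i > n, well within n.natAbs+2 steps)
def pvLoopB (n : Int) : Int → Nat → Bool
  | _, 0 => false
  | i, fuel+1 =>
      if i * i ≤ n then
        if PySem.Int.mod n (i * i) == 0 then true else pvLoopB n (i + 1) fuel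
      else false

def is_power_of_number_alt (n : Int) : Bool :=
  pvLoopB n 2 (n.natAbs + 2)

-- ===== PRECONDITION & SPEC =====
-- Python A raises ValueError (sqrt of a negative) for n < 0; Pre_ admits exactly the n where A returns.
def Pre_is_power_of_number (n : Int) : Prop := 0 ≤ n
instance (n : Int) : Decidable (Pre_is_power_of_number n) := by unfold Pre_is_power_of_number; infer_instance
def pvWitness_is_power_of_number : Int := 12

-- On negative n, A raises ValueError (math domain error from sqrt) while B returns False.
def Raises_is_power_of_number (n : Int) : Prop := n < 0
instance (n : Int) : Decidable (Raises_is_power_of_number n) := by unfold Raises_is_power_of_number; infer_instance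
def pvRaiseWitness_is_power_of_number : Int := -4
def pvRaiseWitnessOut_is_power_of_number : Bool := false

def Spec_is_power_of_number (n : Int) (out : Bool) : Prop := out = is_power_of_number_alt n
instance (n : Int) (out : Bool) : Decidable (Spec_is_power_of_number n out) := by unfold Spec_is_power_of_number; infer_instance

-- ===== CLAIM (what is proved, stated in full; the proofs are below) =====
def Claim_equal_is_power_of_number : Prop := ∀ (n : Int), Dom_is_power_of_number n → Pre_is_power_of_number n → Spec_is_power_of_number n (is_power_of_number n)
def Claim_raises_is_power_of_number : Prop := (∀ (n : Int), Dom_is_power_of_number n → Raises_is_power_of_number n → ¬ Pre_is_power_of_number n) ∧ (Dom_is_power_of_number (pvRaiseWitness_is_power_of_number) ∧ Raises_is_power_of_number (pvRaiseWitness_is_power_of_number) ∧ is_power_of_number_alt (pvRaiseWitness_is_power_of_number) = pvRaiseWitnessOut_is_power_of_number)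

-- ===== LEMMAS AND PROOFS =====

theorem sq_sqrt_le (n : Int) (h : 0 ≤ n) : Int.sqrt n * Int.sqrt n ≤ n := by
  have h1 : n.toNat.sqrt * n.toNat.sqrt ≤ n.toNat := by
    simpa [pow_two] using Nat.sqrt_le' n.toNat
  unfold Int.sqrt
  have h2 : ((Nat.sqrt n.toNat : Int)) * ((Nat.sqrt n.toNat : Int)) ≤ (n.toNat : Int) := by
    exact_mod_cast h1
  omega

theorem lt_sq_succ_sqrt (n : Int) (h : 0 ≤ n) : n < (Int.sqrt n + 1) * (Int.sqrt n + 1) := by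
  have h1 : n.toNat < (n.toNat.sqrt + 1) * (n.toNat.sqrt + 1) := by
    simpa [pow_two, Nat.succ_eq_add_one] using Nat.lt_succ_sqrt' n.toNat
  unfold Int.sqrt
  have h2 : (n.toNat : Int) < ((Nat.sqrt n.toNat : Int) + 1) * ((Nat.sqrt n.toNat : Int) + 1) := by
    exact_mod_cast h1
  omega

theorem pvCountLoop_ge (i : Int) : ∀ (f : Nat) (t c : Int), c ≤ pvCountLoop i t c f := by
  intro f
  induction f with
  | zero => intro t c; simp [pvCountLoop]
  | succ f ih =>
      intro t c
      simp only [pvCountLoop]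
      split
      · exact le_trans (by omega) (ih _ (c + 1))
      · exact le_refl c

theorem pvCountLoop_gt_one_iff (i n : Int) (hi : 2 ≤ i) (k : Nat) :
    (1 < pvCountLoop i n 0 (k + 2)) ↔ (i * i ∣ n) := by
  have hipos : (0:Int) < i := by omega
  have hine : i ≠ 0 := by omega
  simp only [pvCountLoop]
  by_cases h1 : PySem.Int.mod n i = 0
  · have hdvd1 : i ∣ n := (PySem.Int.mod_eq_zero_iff_dvd n i).mp h1
    have hfd : PySem.Int.floordiv n i = n / i := PySem.Int.floordiv_eq_ediv_of_pos hipos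
    simp only [h1, beq_self_eq_true, if_true, hfd]
    have hmul : i * (n / i) = n := Int.mul_ediv_cancel' hdvd1
    have hiff : i * i ∣ n ↔ i ∣ n / i := by
      constructor
      · intro hd
        rcases hd with ⟨q, hq⟩
        refine ⟨q, ?_⟩
        have : i * (n / i) = i * (i * q) := by rw [hmul, hq]; ring
        exact mul_left_cancel₀ hine this
      · intro ⟨q, hq⟩
        exact ⟨q, by rw [← hmul, hq]; ring⟩
    by_cases h2 : PySem.Int.mod (n / i) i = 0
    · have hdvd2 : i ∣ n / i := (PySem.Int.mod_eq_zero_iff_dvd _ i).mp h2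
      simp only [h2, beq_self_eq_true, if_true]
      constructor
      · intro _; exact hiff.mpr hdvd2
      · intro _
        exact lt_of_lt_of_le (by omega) (pvCountLoop_ge i k _ 2)
    · simp only [beq_iff_eq, h2, if_false]
      constructor
      · intro h; omega
      · intro hd; exact absurd ((PySem.Int.mod_eq_zero_iff_dvd _ i).mpr (hiff.mp hd)) h2
  · simp only [beq_iff_eq, h1, if_false]
    constructor
    · intro h; omega
    · intro hd
      have : i ∣ n := dvd_trans (Dvd.intro i rfl) hd
      exact absurd ((PySem.Int.mod_eq_zero_iff_dvd n i).mpr this) h1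

theorem pvLock (n : Int) (hn : 4 ≤ n) :
    ∀ (f : Nat) (i : Int), 2 ≤ i → Int.sqrt n + 1 - i ≤ (f : Int) →
      pvLoopB n i f = pvLoopA n (PySem.List.pyRange i (Int.sqrt n + 1) 1) := by
  have hr0 : 0 ≤ Int.sqrt n := Int.sqrt_nonneg n
  have hrle : Int.sqrt n * Int.sqrt n ≤ n := sq_sqrt_le n (by omega)
  have hrlt : n < (Int.sqrt n + 1) * (Int.sqrt n + 1) := lt_sq_succ_sqrt n (by omega)
  intro f
  induction f with
  | zero =>
      intro i hi hf
      have h0 : Int.sqrt n + 1 ≤ i := by push_cast at hf; omega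
      rw [PySem.List.pyRange_one_eq_nil h0]
      rfl
  | succ f ih =>
      intro i hi hf
      by_cases hle : i * i ≤ n
      · have hlt : i < Int.sqrt n + 1 := by nlinarith
        rw [PySem.List.pyRange_one_cons hlt]
        simp only [pvLoopB, pvLoopA, hle, if_true]
        have hk : n.natAbs + 1 = (n.natAbs - 1) + 2 := by omega
        have hcond : (1 < pvCountLoop i n 0 (n.natAbs + 1)) ↔ (i * i ∣ n) := by
          rw [hk]; exact pvCountLoop_gt_one_iff i n hi _
        have hbcond : (PySem.Int.mod n (i * i) == 0) = true ↔ (i * i ∣ n) := by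
          rw [beq_iff_eq]; exact PySem.Int.mod_eq_zero_iff_dvd n (i * i)
        by_cases hd : i * i ∣ n
        · rw [if_pos (hbcond.mpr hd), if_pos (hcond.mpr hd)]
        · rw [if_neg (fun h => hd (hbcond.mp h)),
              if_neg (fun h => hd (hcond.mp h))]
          exact ih (i + 1) (by omega) (by push_cast at hf ⊢; omega)
      · have hri : Int.sqrt n + 1 ≤ i := by nlinarith
        rw [PySem.List.pyRange_one_eq_nil hri]
        simp [pvLoopB, hle, pvLoopA]

-- ===== VERDICT (by name: the statement is the Claim_ definition above) =====
theorem is_power_of_number_spec : Claim_equal_is_power_of_number := by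
  intro n _hdom hpre
  unfold Spec_is_power_of_number is_power_of_number is_power_of_number_alt
  have hn0 : 0 ≤ n := hpre
  by_cases hn : 4 ≤ n
  · have hr0 : 0 ≤ Int.sqrt n := Int.sqrt_nonneg n
    have hrle : Int.sqrt n * Int.sqrt n ≤ n := sq_sqrt_le n hn0
    have hrn : Int.sqrt n ≤ n := by nlinarith
    have habs : ((n.natAbs : Nat) : Int) = n := Int.natAbs_of_nonneg hn0
    have hfuel : Int.sqrt n + 1 - 2 ≤ ((n.natAbs + 2 : Nat) : Int) := by push_cast at habs ⊢; omega
    exact (pvLock n hn (n.natAbs + 2) 2 (by omega) hfuel).symm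
  · have hroot : Int.sqrt n ≤ 1 := by
      nlinarith [sq_sqrt_le n hn0, Int.sqrt_nonneg n]
    rw [PySem.List.pyRange_one_eq_nil (by omega)]
    show pvLoopA n [] = pvLoopB n 2 (Nat.succ (n.natAbs + 1))
    simp only [pvLoopA, pvLoopB]
    rw [if_neg (by omega : ¬ (2 * 2 : Int) ≤ n)]

@[simp] theorem is_power_of_number_raises : Claim_raises_is_power_of_number := by
  unfold Claim_raises_is_power_of_number
  exact ⟨fun n _ h => by unfold Raises_is_power_of_number Pre_is_power_of_number at *; omega, by decide⟩
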